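-- pv_equiv track=rewrite | github.com/pratzrao/chat_with_dashboards_streamlit | dalgo_chat_dashboard/retrieval/context_pack.py | _extract_relevant_tables
-- ===== SOURCE A (Python) =====
-- from typing import Dict, List, Any, Optional
--
-- def _extract_relevant_tables(charts: List[Dict[str, Any]],
--                              datasets: List[Dict[str, Any]]) -> List[str]:
--     """Extract table names from retrieved charts and datasets"""
--     tables = set()
--
--     # From charts - look at dataset references
--     for chart in charts:
--         dataset_id = chart['metadata'].get('dataset_id', '')
--         if dataset_id:
--             # Try to map dataset to actual table
--             for dataset in datasets:
--                 if dataset['metadata'].get('dataset_id') == dataset_id: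
--                     schema = dataset['metadata'].get('schema', '')
--                     table_name = dataset['metadata'].get('table_name', '')
--                     if schema and table_name:
--                         tables.add(f"{schema}.{table_name}")
--
--     # From datasets directly
--     for dataset in datasets:
--         schema = dataset['metadata'].get('schema', '')
--         table_name = dataset['metadata'].get('table_name', '')
--         if schema and table_name:
--             tables.add(f"{schema}.{table_name}")
--
--     # Add common tables if none found
--     if not tables:
--         tables.update([
--             "prod_gender.case_occurence",
--             "prod_gender.champions",
--             "prod_gender.counselling"
--         ])
--
--     return list(tables)
-- ===== SOURCE B (Python) =====
-- def _extract_relevant_tables(charts, datasets):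
--     """Extract table names from retrieved charts and datasets"""
--     # One pass over datasets: the tables in order, plus an index dataset_id -> its tables
--     index = {}
--     dataset_tables = []
--     for dataset in datasets:
--         md = dataset['metadata']
--         schema = md.get('schema', '')
--         table_name = md.get('table_name', '')
--         if schema and table_name:
--             full = f"{schema}.{table_name}"
--             index.setdefault(md.get('dataset_id', ''), []).append(full)
--             dataset_tables.append(full)
--
--     tables = set()
--     # Charts resolve their dataset reference by one O(1) lookup
--     for chart in charts:
--         dataset_id = chart['metadata'].get('dataset_id', '')
--         if dataset_id:
--             tables.update(index.get(dataset_id, ()))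
--
--     tables.update(dataset_tables)
--
--     if not tables:
--         tables.update([
--             "prod_gender.case_occurence",
--             "prod_gender.champions",
--             "prod_gender.counselling"
--         ])
--
--     return list(tables)
-- ===== Notes on version B (the rewrite author's own statement) =====
-- stated objective: faster
-- what changed: B replaces A's nested chart-by-dataset scan with a single pass over datasets that builds the table list and a dict index from dataset_id to its tables, so each chart resolves its reference by one dict lookup instead of scanning all datasets.
import Mathlib
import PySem

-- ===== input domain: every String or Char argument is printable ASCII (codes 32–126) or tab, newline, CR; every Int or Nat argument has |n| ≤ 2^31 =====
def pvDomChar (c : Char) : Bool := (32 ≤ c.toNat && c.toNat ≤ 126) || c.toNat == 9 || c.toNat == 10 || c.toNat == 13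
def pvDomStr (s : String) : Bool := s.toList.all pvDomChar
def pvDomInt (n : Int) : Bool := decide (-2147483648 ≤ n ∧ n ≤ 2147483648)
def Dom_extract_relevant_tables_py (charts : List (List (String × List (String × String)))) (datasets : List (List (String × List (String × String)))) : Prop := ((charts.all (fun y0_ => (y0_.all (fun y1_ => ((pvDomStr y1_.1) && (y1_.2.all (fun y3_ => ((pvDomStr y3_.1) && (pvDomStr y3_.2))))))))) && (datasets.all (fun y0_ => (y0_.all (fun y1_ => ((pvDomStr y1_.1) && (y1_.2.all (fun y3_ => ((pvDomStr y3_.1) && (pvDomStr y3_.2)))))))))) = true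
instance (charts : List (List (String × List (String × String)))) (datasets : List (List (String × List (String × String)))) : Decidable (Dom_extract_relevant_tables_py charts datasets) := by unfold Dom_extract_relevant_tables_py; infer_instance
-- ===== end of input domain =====

-- B builds, in one pass over datasets, the table list and a dict index dataset_id → tables,
-- so each chart is resolved by one dict lookup instead of a scan over all datasets.
-- Both Pythons raise KeyError when an element lacks the 'metadata' key; Pre_ admits the others.

-- x['metadata'] (shared by both sources), totalised with []: Pre_ guarantees the key is present
def pvMeta (x : List (String × List (String × String))) : List (String × String) :=
  ((PySem.Dict.mk x).get? "metadata").getD []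

-- ===== PORT A =====
def extract_relevant_tables_py (charts : List (List (String × List (String × String)))) (datasets : List (List (String × List (String × String)))) : List String :=
  let tables : PySem.Set String := PySem.Set.empty
  -- From charts - look at dataset references
  let tables := charts.foldl (fun tables chart =>
    let dataset_id := (PySem.Dict.mk (pvMeta chart)).getD "dataset_id" ""
    if dataset_id ≠ "" then
      -- Try to map dataset to actual table
      datasets.foldl (fun tables dataset =>
        if (PySem.Dict.mk (pvMeta dataset)).get? "dataset_id" = some dataset_id then
          let schema := (PySem.Dict.mk (pvMeta dataset)).getD "schema" ""
          let table_name := (PySem.Dict.mk (pvMeta dataset)).getD "table_name" ""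
          if schema ≠ "" ∧ table_name ≠ "" then PySem.Set.add tables (schema ++ "." ++ table_name)
          else tables
        else tables) tables
    else tables) tables
  -- From datasets directly
  let tables := datasets.foldl (fun tables dataset =>
    let schema := (PySem.Dict.mk (pvMeta dataset)).getD "schema" ""
    let table_name := (PySem.Dict.mk (pvMeta dataset)).getD "table_name" ""
    if schema ≠ "" ∧ table_name ≠ "" then PySem.Set.add tables (schema ++ "." ++ table_name)
    else tables) tables
  -- Add common tables if none found
  if tables = ([] : List String) then
    PySem.Set.update tables ["prod_gender.case_occurence", "prod_gender.champions", "prod_gender.counselling"]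
  else tables

-- ===== PORT B =====
def extract_relevant_tables_py_alt (charts : List (List (String × List (String × String)))) (datasets : List (List (String × List (String × String)))) : List String :=
  -- one pass over datasets: index = {dataset_id: [tables]}, dataset_tables = tables in order
  let st := datasets.foldl (fun (st : PySem.Dict String (List String) × List String) dataset =>
    let md := pvMeta dataset
    let schema := (PySem.Dict.mk md).getD "schema" ""
    let table_name := (PySem.Dict.mk md).getD "table_name" ""
    if schema ≠ "" ∧ table_name ≠ "" then
      let full := schema ++ "." ++ table_name
      (st.1.modify ((PySem.Dict.mk md).getD "dataset_id" "") [] (· ++ [full]), st.2 ++ [full])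
    else st) (PySem.Dict.empty, ([] : List String))
  let index := st.1
  let dataset_tables := st.2
  let tables : PySem.Set String := PySem.Set.empty
  -- charts resolve their dataset reference by one lookup
  let tables := charts.foldl (fun tables chart =>
    let dataset_id := (PySem.Dict.mk (pvMeta chart)).getD "dataset_id" ""
    if dataset_id ≠ "" then PySem.Set.update tables (index.getD dataset_id []) else tables) tables
  let tables := PySem.Set.update tables dataset_tables
  if tables = ([] : List String) then
    PySem.Set.update tables ["prod_gender.case_occurence", "prod_gender.champions", "prod_gender.counselling"]
  else tables

-- ===== PRECONDITION & SPEC =====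
-- Pre_ excludes exactly the inputs where a chart or dataset lacks the 'metadata' key: there
-- both A and B raise KeyError.
def Pre_extract_relevant_tables_py (charts : List (List (String × List (String × String)))) (datasets : List (List (String × List (String × String)))) : Prop :=
  (charts.all (fun c => c.any (fun p => p.1 == "metadata")) &&
   datasets.all (fun d => d.any (fun p => p.1 == "metadata"))) = true
instance (charts : List (List (String × List (String × String)))) (datasets : List (List (String × List (String × String)))) : Decidable (Pre_extract_relevant_tables_py charts datasets) := by unfold Pre_extract_relevant_tables_py; infer_instance

def pvWitness_extract_relevant_tables_py : (List (List (String × List (String × String)))) × (List (List (String × List (String × String)))) :=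
  ([[("metadata", [("dataset_id", "d1")])]],
   [[("metadata", [("dataset_id", "d1"), ("schema", "s"), ("table_name", "t")])]])

def Spec_extract_relevant_tables_py (charts : List (List (String × List (String × String)))) (datasets : List (List (String × List (String × String)))) (out : List String) : Prop := out = extract_relevant_tables_py_alt charts datasets
instance (charts : List (List (String × List (String × String)))) (datasets : List (List (String × List (String × String)))) (out : List String) : Decidable (Spec_extract_relevant_tables_py charts datasets out) := by unfold Spec_extract_relevant_tables_py; infer_instance

-- ===== CLAIM (what is proved, stated in full; the proofs are below) =====
def Claim_equal_extract_relevant_tables_py : Prop := ∀ (charts : List (List (String × List (String × String)))) (datasets : List (List (String × List (String × String)))), Dom_extract_relevant_tables_py charts datasets → Pre_extract_relevant_tables_py charts datasets → Spec_extract_relevant_tables_py charts datasets (extract_relevant_tables_py charts datasets)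

-- ===== LEMMAS AND PROOFS =====

-- the (dataset_id, "schema.table") pair a dataset contributes, if any
def pvEntry (dataset : List (String × List (String × String))) : Option (String × String) :=
  let md := pvMeta dataset
  let schema := (PySem.Dict.mk md).getD "schema" ""
  let table_name := (PySem.Dict.mk md).getD "table_name" ""
  if schema ≠ "" ∧ table_name ≠ "" then
    some ((PySem.Dict.mk md).getD "dataset_id" "", schema ++ "." ++ table_name)
  else none

theorem pvEntry_some (ds : List (String × List (String × String)))
    (h : (PySem.Dict.mk (pvMeta ds)).getD "schema" "" ≠ "" ∧ (PySem.Dict.mk (pvMeta ds)).getD "table_name" "" ≠ "") :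
    pvEntry ds = some ((PySem.Dict.mk (pvMeta ds)).getD "dataset_id" "",
      (PySem.Dict.mk (pvMeta ds)).getD "schema" "" ++ "." ++ (PySem.Dict.mk (pvMeta ds)).getD "table_name" "") := by
  simp only [pvEntry, if_pos h]

theorem pvEntry_none (ds : List (String × List (String × String)))
    (h : ¬ ((PySem.Dict.mk (pvMeta ds)).getD "schema" "" ≠ "" ∧ (PySem.Dict.mk (pvMeta ds)).getD "table_name" "" ≠ "")) :
    pvEntry ds = none := by
  simp only [pvEntry, if_neg h]

theorem pv_foldl_fun_eq {α β : Type} {f g : α → β → α} (h : ∀ a b, f a b = g a b)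
    (l : List β) (a : α) : l.foldl f a = l.foldl g a := by
  have : f = g := funext fun a => funext fun b => h a b
  rw [this]

-- B's dataset pass, characterised through pvEntry
theorem pvB_fold (datasets : List (List (String × List (String × String))))
    (d : PySem.Dict String (List String)) (tl : List String) :
    datasets.foldl (fun (st : PySem.Dict String (List String) × List String) dataset =>
      let md := pvMeta dataset
      let schema := (PySem.Dict.mk md).getD "schema" ""
      let table_name := (PySem.Dict.mk md).getD "table_name" ""
      if schema ≠ "" ∧ table_name ≠ "" then
        let full := schema ++ "." ++ table_name
        (st.1.modify ((PySem.Dict.mk md).getD "dataset_id" "") [] (· ++ [full]), st.2 ++ [full])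
      else st) (d, tl)
    = ((datasets.filterMap pvEntry).foldl (fun d p => d.modify p.1 [] (· ++ [p.2])) d,
       tl ++ (datasets.filterMap pvEntry).map (·.2)) := by
  induction datasets generalizing d tl with
  | nil => simp
  | cons ds rest ih =>
    simp only [List.foldl_cons, List.filterMap_cons]
    by_cases h : ((PySem.Dict.mk (pvMeta ds)).getD "schema" "" ≠ "" ∧ (PySem.Dict.mk (pvMeta ds)).getD "table_name" "" ≠ "")
    · rw [if_pos h, pvEntry_some ds h, ih]
      simp
    · rw [if_neg h, pvEntry_none ds h, ih]

-- A's inner dataset scan for one chart = folding add over that id's index entry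
theorem pvA_inner (datasets : List (List (String × List (String × String))))
    (id : String) (hid : id ≠ "") (tables : PySem.Set String) :
    datasets.foldl (fun tables dataset =>
      if (PySem.Dict.mk (pvMeta dataset)).get? "dataset_id" = some id then
        let schema := (PySem.Dict.mk (pvMeta dataset)).getD "schema" ""
        let table_name := (PySem.Dict.mk (pvMeta dataset)).getD "table_name" ""
        if schema ≠ "" ∧ table_name ≠ "" then PySem.Set.add tables (schema ++ "." ++ table_name)
        else tables
      else tables) tables
    = (((datasets.filterMap pvEntry).filter (fun p => p.1 == id)).map (·.2)).foldl PySem.Set.add tables := by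
  induction datasets generalizing tables with
  | nil => rfl
  | cons ds rest ih =>
    simp only [List.foldl_cons, List.filterMap_cons]
    by_cases helig : ((PySem.Dict.mk (pvMeta ds)).getD "schema" "" ≠ "" ∧ (PySem.Dict.mk (pvMeta ds)).getD "table_name" "" ≠ "")
    · rw [pvEntry_some ds helig]
      by_cases hmatch : (PySem.Dict.mk (pvMeta ds)).get? "dataset_id" = some id
      · have hk : ((PySem.Dict.mk (pvMeta ds)).getD "dataset_id" "" == id) = true := by
          rw [PySem.Dict.getD_eq_get?_getD, hmatch]; simp
        rw [if_pos hmatch, if_pos helig]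
        simp only [List.filter_cons, hk, if_true, List.map_cons, List.foldl_cons]
        exact ih _
      · have hk : ((PySem.Dict.mk (pvMeta ds)).getD "dataset_id" "" == id) = false := by
          rw [PySem.Dict.getD_eq_get?_getD]
          cases hg : (PySem.Dict.mk (pvMeta ds)).get? "dataset_id" with
          | none =>
            simp only [Option.getD_none]
            exact beq_eq_false_iff_ne.mpr (Ne.symm hid)
          | some s =>
            simp only [Option.getD_some]
            exact beq_eq_false_iff_ne.mpr (fun hsi => hmatch (by rw [hg, hsi]))
        rw [if_neg hmatch]
        simp only [List.filter_cons, hk, if_false, Bool.false_eq_true]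
        exact ih _
    · rw [pvEntry_none ds helig]
      by_cases hmatch : (PySem.Dict.mk (pvMeta ds)).get? "dataset_id" = some id
      · rw [if_pos hmatch, if_neg helig]
        exact ih _
      · rw [if_neg hmatch]
        exact ih _

-- A's second loop = folding add over all contributed tables
theorem pvA_second (datasets : List (List (String × List (String × String))))
    (tables : PySem.Set String) :
    datasets.foldl (fun tables dataset =>
      let schema := (PySem.Dict.mk (pvMeta dataset)).getD "schema" ""
      let table_name := (PySem.Dict.mk (pvMeta dataset)).getD "table_name" ""
      if schema ≠ "" ∧ table_name ≠ "" then PySem.Set.add tables (schema ++ "." ++ table_name)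
      else tables) tables
    = ((datasets.filterMap pvEntry).map (·.2)).foldl PySem.Set.add tables := by
  induction datasets generalizing tables with
  | nil => rfl
  | cons ds rest ih =>
    simp only [List.foldl_cons, List.filterMap_cons]
    by_cases helig : ((PySem.Dict.mk (pvMeta ds)).getD "schema" "" ≠ "" ∧ (PySem.Dict.mk (pvMeta ds)).getD "table_name" "" ≠ "")
    · rw [if_pos helig, pvEntry_some ds helig]
      simp only [List.map_cons, List.foldl_cons]
      exact ih _
    · rw [if_neg helig, pvEntry_none ds helig]
      exact ih _

-- ===== VERDICT (by name: the statement is the Claim_ definition above) =====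
theorem extract_relevant_tables_py_spec : Claim_equal_extract_relevant_tables_py := by
  intro charts datasets _ _
  unfold Spec_extract_relevant_tables_py
  simp only [extract_relevant_tables_py, extract_relevant_tables_py_alt]
  rw [pvB_fold]
  simp only [List.nil_append, PySem.Set.update]
  rw [pvA_second]
  have key := pv_foldl_fun_eq
    (f := fun (tables : PySem.Set String) chart =>
      if (PySem.Dict.mk (pvMeta chart)).getD "dataset_id" "" ≠ "" then
        List.foldl (fun (tables : PySem.Set String) dataset =>
          if (PySem.Dict.mk (pvMeta dataset)).get? "dataset_id" = some ((PySem.Dict.mk (pvMeta chart)).getD "dataset_id" "") then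
            if (PySem.Dict.mk (pvMeta dataset)).getD "schema" "" ≠ "" ∧ (PySem.Dict.mk (pvMeta dataset)).getD "table_name" "" ≠ "" then
              PySem.Set.add tables ((PySem.Dict.mk (pvMeta dataset)).getD "schema" "" ++ "." ++ (PySem.Dict.mk (pvMeta dataset)).getD "table_name" "")
            else tables
          else tables) tables datasets
      else tables)
    (g := fun (tables : PySem.Set String) chart =>
      if (PySem.Dict.mk (pvMeta chart)).getD "dataset_id" "" ≠ "" then
        List.foldl PySem.Set.add tables
          ((List.foldl (fun (d : PySem.Dict String (List String)) p => d.modify p.1 [] fun x => x ++ [p.2]) PySem.Dict.empty (List.filterMap pvEntry datasets)).getD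
            ((PySem.Dict.mk (pvMeta chart)).getD "dataset_id" "") [])
      else tables)
    (by
      intro tables chart
      beta_reduce
      by_cases hid : (PySem.Dict.mk (pvMeta chart)).getD "dataset_id" "" ≠ ""
      · rw [if_pos hid, if_pos hid, pvA_inner datasets _ hid tables, PySem.Dict.getD_foldl_modify_append]
        simp [PySem.Dict.getD_empty]
      · rw [if_neg hid, if_neg hid])
    charts PySem.Set.empty
  rw [key]
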